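-- pv_equiv track=rewrite | github.com/leozhang2056/leozhang2056 | app/backend/generate_cv_from_kb.py | _last_sentence_period_index
-- ===== SOURCE A (Python) =====
-- def _last_sentence_period_index(text: str, before_index: int) -> int:
--     """
--     最大的 i < before_index 且 text[i] == '.'，且不是小数点（如 99.9%）。
--     避免 rfind('.') 把「99.」当成句末，造成 overview / summary 残句。
--     """
--     if before_index <= 0 or not text:
--         return -1
--     lim = min(before_index - 1, len(text) - 1)
--     for i in range(lim, -1, -1):
--         if text[i] != ".":
--             continue
--         prev_d = i > 0 and text[i - 1].isdigit()
--         next_d = i + 1 < len(text) and text[i + 1].isdigit()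
--         if prev_d and next_d:
--             continue
--         return i
--     return -1
-- ===== SOURCE B (Python) =====
-- def _last_sentence_period_index(text: str, before_index: int) -> int:
--     best = -1
--     prev_digit = False
--     for i, ch in enumerate(text):
--         if i >= before_index:
--             break
--         if ch == ".":
--             next_digit = i + 1 < len(text) and text[i + 1].isdigit()
--             if not (prev_digit and next_digit):
--                 best = i
--         prev_digit = ch.isdigit()
--     return best
-- ===== Notes on version B (the rewrite author's own statement) =====
-- stated objective: alternative
-- what changed: Replaces A's backward early-return scan over an index range with a single forward pass over the characters that carries a prev-digit flag and a best-so-far accumulator (no text[i-1] lookup, no guard branch), breaking at before_index.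
import Mathlib
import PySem

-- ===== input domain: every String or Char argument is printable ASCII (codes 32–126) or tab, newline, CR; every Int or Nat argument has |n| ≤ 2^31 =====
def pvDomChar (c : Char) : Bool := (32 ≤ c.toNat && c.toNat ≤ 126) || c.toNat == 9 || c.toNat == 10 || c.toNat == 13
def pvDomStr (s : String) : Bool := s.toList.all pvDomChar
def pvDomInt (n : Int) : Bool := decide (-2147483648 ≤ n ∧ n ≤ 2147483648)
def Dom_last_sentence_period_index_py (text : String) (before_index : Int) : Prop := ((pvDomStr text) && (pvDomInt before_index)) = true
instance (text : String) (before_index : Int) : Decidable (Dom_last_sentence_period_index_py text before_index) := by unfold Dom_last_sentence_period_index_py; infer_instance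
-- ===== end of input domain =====

-- B replaces A's backward early-return index scan with a single forward pass over the characters carrying a prev-digit flag and a best-so-far accumulator; same cost, different decomposition.


-- ===== PORT A =====
-- the for-loop with `continue`/`return i`; indices drawn from range(lim, -1, -1) are always
-- in range, so text[i] is ported with pyGetD (exact on in-range indices)
def pvALoop (cs : List Char) : List Int → Int
  | [] => -1
  | i :: rest =>
      if ¬ (PySem.List.pyGetD cs i ' ' == '.') then pvALoop cs rest
      else
        let prev_d := decide (0 < i) && PySem.Chars.isdigit (PySem.List.pyGetD cs (i - 1) ' ')
        let next_d := decide (i + 1 < (cs.length : Int)) && PySem.Chars.isdigit (PySem.List.pyGetD cs (i + 1) ' ')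
        if prev_d && next_d then pvALoop cs rest else i

def last_sentence_period_index_py (text : String) (before_index : Int) : Int :=
  if before_index ≤ 0 ∨ text = "" then -1
  else
    let cs := text.toList
    let lim := min (before_index - 1) ((cs.length : Int) - 1)
    pvALoop cs (PySem.List.pyRange lim (-1) (-1))

-- ===== PORT B =====
-- Source B's `for i, ch in enumerate(text)` with break, best accumulator and carried prev_digit flag;
-- the one guarded lookup text[i+1] is ported with pyGetD (exact on in-range indices)
def pvBLoop (cs : List Char) (before_index : Int) : Int → Bool → List (Int × Char) → Int
  | best, _, [] => best
  | best, prevDigit, (i, ch) :: rest =>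
      if before_index ≤ i then best
      else
        let best' :=
          if ch == '.' then
            let nextDigit := decide (i + 1 < (cs.length : Int)) && PySem.Chars.isdigit (PySem.List.pyGetD cs (i + 1) ' ')
            if ! (prevDigit && nextDigit) then i else best
          else best
        pvBLoop cs before_index best' (PySem.Chars.isdigit ch) rest

def last_sentence_period_index_py_alt (text : String) (before_index : Int) : Int :=
  let cs := text.toList
  pvBLoop cs before_index (-1) false (PySem.List.enumerate cs 0)

-- ===== PRECONDITION & SPEC =====
def Spec_last_sentence_period_index_py (text : String) (before_index : Int) (out : Int) : Prop := out = last_sentence_period_index_py_alt text before_index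
instance (text : String) (before_index : Int) (out : Int) : Decidable (Spec_last_sentence_period_index_py text before_index out) := by unfold Spec_last_sentence_period_index_py; infer_instance

-- ===== CLAIM (what is proved, stated in full; the proofs are below) =====
def Claim_equal_last_sentence_period_index_py : Prop := ∀ (text : String) (before_index : Int), Dom_last_sentence_period_index_py text before_index → Spec_last_sentence_period_index_py text before_index (last_sentence_period_index_py text before_index)

-- ===== LEMMAS AND PROOFS =====

-- the qualifying-period predicate both loops decide (proof-only helper)
def pvCand (cs : List Char) (i : Int) : Bool :=
  (PySem.List.pyGetD cs i ' ' == '.') &&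
  ! ((decide (0 < i) && PySem.Chars.isdigit (PySem.List.pyGetD cs (i - 1) ' ')) &&
     (decide (i + 1 < (cs.length : Int)) && PySem.Chars.isdigit (PySem.List.pyGetD cs (i + 1) ' ')))

-- the value B's carried prev_digit flag holds when the loop reaches index k
def pvPrev (cs : List Char) (k : Nat) : Bool :=
  decide (0 < (k : Int)) && PySem.Chars.isdigit (PySem.List.pyGetD cs ((k : Int) - 1) ' ')

theorem find?_eq_head?_filter' (p : Int → Bool) (l : List Int) :
    l.find? p = (l.filter p).head? := by
  induction l with
  | nil => rfl
  | cons x t ih =>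
      rw [List.find?_cons, List.filter_cons]
      by_cases hx : p x = true
      · rw [hx]; rfl
      · rw [Bool.not_eq_true] at hx
        rw [hx, ih]; rfl

theorem getLast?_cons_getD (x b : Int) (l : List Int) :
    (x :: l).getLast?.getD b = l.getLast?.getD x := by
  cases l with
  | nil => rfl
  | cons y t =>
      rw [List.getLast?_cons_cons]
      cases hz : (y :: t).getLast? with
      | none => simp [List.getLast?_eq_none_iff] at hz
      | some z => rfl

-- A's loop returns the first index of the traversal list that passes the candidate test
theorem pvALoop_eq_find? (cs : List Char) (l : List Int) :
    pvALoop cs l = (l.find? (pvCand cs)).getD (-1) := by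
  induction l with
  | nil => rfl
  | cons i rest ih =>
      by_cases h1 : (PySem.List.pyGetD cs i ' ' == '.') = true
      · by_cases h2 : (decide (0 < i) && PySem.Chars.isdigit (PySem.List.pyGetD cs (i - 1) ' ')
            && (decide (i + 1 < (cs.length : Int)) && PySem.Chars.isdigit (PySem.List.pyGetD cs (i + 1) ' '))) = true
        · have hc : pvCand cs i = false := by simp [pvCand, h1, h2]
          rw [pvALoop, if_neg (by simp [h1]), if_pos h2, List.find?_cons, hc]
          simpa using ih
        · have hc : pvCand cs i = true := by simp [pvCand, h1, h2]
          rw [pvALoop, if_neg (by simp [h1]), if_neg (by simp [h2]), List.find?_cons, hc]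
          rfl
      · have hc : pvCand cs i = false := by simp [pvCand, h1]
        rw [pvALoop, if_pos (by simpa using h1), List.find?_cons, hc]
        simpa using ih

-- B's loop keeps the LAST qualifying index of the remaining forward range
theorem pvBLoop_spec (cs : List Char) (bi : Int) :
    ∀ (ys : List Char) (k : Nat) (b : Int), ys = cs.drop k →
    pvBLoop cs bi b (pvPrev cs k) (PySem.List.enumerate ys (k : Int)) =
      (((PySem.List.pyRange (k : Int) (min bi (cs.length : Int)) 1).filter (pvCand cs)).getLast?).getD b := by
  intro ys
  induction ys with
  | nil =>
      intro k b h
      have hk : cs.length ≤ k := by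
        by_contra hlt
        have := List.drop_eq_nil_iff.mp h.symm
        omega
      rw [PySem.List.enumerate_nil, PySem.List.pyRange_one_eq_nil (by
        have : min bi (cs.length : Int) ≤ (cs.length : Int) := min_le_right _ _
        omega)]
      rfl
  | cons ch rest ih =>
      intro k b h
      have hk : k < cs.length := by
        by_contra hge
        rw [List.drop_eq_nil_iff.mpr (by omega)] at h
        simp at h
      have hch : cs[k] = ch := by
        have h0 : (cs.drop k).head? = some ch := by rw [← h]; rfl
        rw [List.head?_drop, List.getElem?_eq_getElem hk] at h0
        exact Option.some.inj h0
      have hrest : rest = cs.drop (k + 1) := by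
        rw [← List.tail_drop, ← h]
        rfl
      rw [PySem.List.enumerate_cons, pvBLoop]
      by_cases hbi : bi ≤ (k : Int)
      · rw [if_pos hbi, PySem.List.pyRange_one_eq_nil (by
          have : min bi (cs.length : Int) ≤ bi := min_le_left _ _
          omega)]
        rfl
      · rw [if_neg hbi]
        have hkd : PySem.List.pyGetD cs (k : Int) ' ' = ch := by
          simp [PySem.List.pyGetD_natCast, List.getD_eq_getElem?_getD, hk, hch]
        have hprev : pvPrev cs (k + 1) = PySem.Chars.isdigit ch := by
          have h1 : ((k : Int) + 1 - 1) = (k : Int) := by omega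
          simp [pvPrev, Nat.cast_add, h1, hkd]
        have hcons : PySem.List.pyRange (k : Int) (min bi (cs.length : Int)) 1
            = (k : Int) :: PySem.List.pyRange ((k : Int) + 1) (min bi (cs.length : Int)) 1 := by
          apply PySem.List.pyRange_one_cons
          omega
        have hcast : ((k : Int) + 1) = ((k + 1 : Nat) : Int) := by push_cast; ring
        have hc : pvCand cs (k : Int)
            = ((ch == '.') && ! (pvPrev cs k && (decide ((k : Int) + 1 < (cs.length : Int)) && PySem.Chars.isdigit (PySem.List.pyGetD cs ((k : Int) + 1) ' ')))) := by
          simp only [pvCand, pvPrev, hkd]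
        show pvBLoop cs bi
            (if (ch == '.') = true then
              (if (! (pvPrev cs k && (decide ((k : Int) + 1 < (cs.length : Int)) && PySem.Chars.isdigit (PySem.List.pyGetD cs ((k : Int) + 1) ' ')))) = true then (k : Int) else b)
            else b)
            (PySem.Chars.isdigit ch) (PySem.List.enumerate rest ((k : Int) + 1)) =
          (List.filter (pvCand cs) (PySem.List.pyRange (k : Int) (min bi (cs.length : Int)) 1)).getLast?.getD b
        rw [hcons, List.filter_cons]
        by_cases h1 : (ch == '.') = true
        · by_cases h2 : (pvPrev cs k && (decide ((k : Int) + 1 < (cs.length : Int)) && PySem.Chars.isdigit (PySem.List.pyGetD cs ((k : Int) + 1) ' '))) = true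
          · rw [if_pos h1, if_neg (by simp [h2]), if_neg (by rw [hc]; simp [h2]),
              ← hprev, hcast, ih (k + 1) b hrest]
          · rw [if_pos h1, if_pos (by simp [h2]), if_pos (by rw [hc, h1]; simp [h2]),
              ← hprev, hcast, ih (k + 1) (k : Int) hrest, getLast?_cons_getD]
        · rw [if_neg h1, if_neg (by rw [hc]; simp [h1]),
            ← hprev, hcast, ih (k + 1) b hrest]

-- ===== VERDICT (by name: the statement is the Claim_ definition above) =====
theorem last_sentence_period_index_py_spec : Claim_equal_last_sentence_period_index_py := by
  intro text before_index _
  show last_sentence_period_index_py text before_index = last_sentence_period_index_py_alt text before_index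
  unfold last_sentence_period_index_py last_sentence_period_index_py_alt
  have hB := pvBLoop_spec text.toList before_index text.toList 0 (-1) (by simp)
  have hprev0 : pvPrev text.toList 0 = false := by simp [pvPrev]
  rw [hprev0] at hB
  simp only [Nat.cast_zero] at hB
  rw [hB]
  by_cases hg : before_index ≤ 0 ∨ text = ""
  · rw [if_pos hg]
    rcases hg with h | h
    · rw [PySem.List.pyRange_one_eq_nil (by
        have := min_le_left before_index ((text.toList.length : Int)); omega)]
      rfl
    · subst h
      rw [PySem.List.pyRange_one_eq_nil (by
        have h0 : (("" : String).toList.length : Int) = 0 := by simp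
        have := min_le_right before_index ((("" : String).toList.length : Int))
        omega)]
      rfl
  · rw [if_neg hg]
    rw [not_or] at hg
    obtain ⟨hg1, hg2⟩ := hg
    have h1 : 0 < before_index := by omega
    have h2 : text ≠ "" := hg2
    have hne : text.toList ≠ [] := by
      intro hnil
      exact h2 (by simpa using congrArg String.ofList hnil)
    have hlen : 0 < text.toList.length := List.length_pos_iff.mpr hne
    set cs := text.toList
    set lim := min (before_index - 1) ((cs.length : Int) - 1) with hlim
    have hlim1 : lim + 1 = min before_index (cs.length : Int) := by
      rw [hlim]; omega
    rw [pvALoop_eq_find?, PySem.List.pyRange_neg_one_eq_reverse]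
    norm_num
    rw [hlim1, find?_eq_head?_filter', List.filter_reverse, List.head?_reverse]
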